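-- pv_equiv track=rewrite | github.com/colinroybell/aoc-py | src/ecst03/day01.py | dominant_colour
-- ===== SOURCE A (Python) =====
-- def dominant_colour(values):
--     m = max(values)
--     d = None
--     for p, v in enumerate(values):
--         if v == m:
--             if d == None:
--                 d = p
--             else:
--                 return None
--     return d
-- ===== SOURCE B (Python) =====
-- def dominant_colour(values):
--     m = max(values)
--     if values.count(m) == 1:
--         return values.index(m)
--     return None
-- ===== Notes on version B (the rewrite author's own statement) =====
-- stated objective: simpler
-- what changed: Replaces the single enumerate loop carrying first-index/second-hit state with a count-then-index decomposition: return values.index(max) iff the maximum occurs exactly once.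
import Mathlib
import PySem

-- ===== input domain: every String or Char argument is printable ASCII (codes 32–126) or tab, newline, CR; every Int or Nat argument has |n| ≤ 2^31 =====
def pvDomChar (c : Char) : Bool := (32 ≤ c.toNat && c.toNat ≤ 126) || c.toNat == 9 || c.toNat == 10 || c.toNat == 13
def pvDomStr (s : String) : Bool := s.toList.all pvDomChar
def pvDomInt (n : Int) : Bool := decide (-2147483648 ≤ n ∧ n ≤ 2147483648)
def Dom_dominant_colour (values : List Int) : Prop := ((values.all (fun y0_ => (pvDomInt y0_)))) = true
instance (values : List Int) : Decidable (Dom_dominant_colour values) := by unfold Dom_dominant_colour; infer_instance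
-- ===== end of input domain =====

-- B replaces A's single enumerate loop with running first-index/second-hit state
-- by a count-then-index decomposition (simpler); on the empty list both raise ValueError (max of empty), excluded by Pre_.


-- ===== PORT A =====
-- the 'for p, v in enumerate(values)' loop with state d (early 'return None' on a second hit)
def pvLoopA (m : Int) (d : Option Int) : List (Int × Int) → Option Int
  | [] => d
  | (p, v) :: rest =>
      if v = m then
        match d with
        | none => pvLoopA m (some p) rest
        | some _ => none
      else pvLoopA m d rest

def dominant_colour (values : List Int) : Option Int :=
  match PySem.List.max? values (fun y => y) with
  | none => none   -- max([]) raises ValueError; excluded by Pre_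
  | some m => pvLoopA m none (PySem.List.enumerate values 0)

-- ===== PORT B =====
def dominant_colour_alt (values : List Int) : Option Int :=
  match PySem.List.max? values (fun y => y) with
  | none => none   -- max([]) raises ValueError; excluded by Pre_
  | some m =>
      if PySem.List.count values m = 1 then
        (PySem.List.index? values m).map (fun k => (k : Int))
      else none

-- ===== PRECONDITION & SPEC =====
-- A (and B) raise ValueError on the empty list (max of empty sequence); Pre_ excludes exactly that.
def Pre_dominant_colour (values : List Int) : Prop := values ≠ []
instance (values : List Int) : Decidable (Pre_dominant_colour values) := by unfold Pre_dominant_colour; infer_instance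
def pvWitness_dominant_colour : List Int := ([3, 1, 3, 2] : List Int)

def Spec_dominant_colour (values : List Int) (out : Option Int) : Prop := out = dominant_colour_alt values
instance (values : List Int) (out : Option Int) : Decidable (Spec_dominant_colour values out) := by unfold Spec_dominant_colour; infer_instance

-- ===== CLAIM (what is proved, stated in full; the proofs are below) =====
def Claim_equal_dominant_colour : Prop := ∀ (values : List Int), Dom_dominant_colour values → Pre_dominant_colour values → Spec_dominant_colour values (dominant_colour values)

-- ===== LEMMAS AND PROOFS =====

-- once d is set, a further hit returns None; otherwise d survives
theorem pvLoopA_some (m j : Int) (l : List Int) (s : Int) :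
    pvLoopA m (some j) (PySem.List.enumerate l s) =
      if l.count m = 0 then some j else none := by
  induction l generalizing s with
  | nil => simp [PySem.List.enumerate_nil, pvLoopA]
  | cons x t ih =>
      rw [PySem.List.enumerate_cons]
      by_cases hx : x = m
      · subst hx
        simp [pvLoopA, List.count_cons_self]
      · simp [pvLoopA, hx, ih, List.count_cons_of_ne (by simpa using hx)]

-- the loop with d = None computes the unique position of m (offset by the start index)
theorem pvLoopA_none (m : Int) (l : List Int) (s : Int) :
    pvLoopA m none (PySem.List.enumerate l s) =
      if l.count m = 1 then (PySem.List.index? l m).map (fun k => s + (k : Int))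
      else if l.count m = 0 then none else none := by
  induction l generalizing s with
  | nil => simp [PySem.List.enumerate_nil, pvLoopA]
  | cons x t ih =>
      rw [PySem.List.enumerate_cons]
      by_cases hx : x = m
      · subst hx
        rw [show pvLoopA x none ((s, x) :: PySem.List.enumerate t (s+1)) =
              pvLoopA x (some s) (PySem.List.enumerate t (s+1)) by simp [pvLoopA]]
        rw [pvLoopA_some]
        by_cases h0 : t.count x = 0
        · rw [PySem.List.index?_cons_self]
          simp [h0, List.count_cons_self]
        · simp only [List.count_cons_self]
          rw [if_neg (by omega), if_neg (by omega)]
          simp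
      · rw [show pvLoopA m none ((s, x) :: PySem.List.enumerate t (s+1)) =
              pvLoopA m none (PySem.List.enumerate t (s+1)) by simp [pvLoopA, hx]]
        rw [ih, List.count_cons_of_ne (by simpa using hx),
            PySem.List.index?_cons_of_ne t hx]
        by_cases h1 : t.count m = 1
        · cases PySem.List.index? t m with
          | none => simp [h1]
          | some k =>
              simp [h1]
              ring
        · simp [h1]

-- ===== VERDICT (by name: the statement is the Claim_ definition above) =====
theorem dominant_colour_spec : Claim_equal_dominant_colour := by
  intro values _ hpre
  unfold Spec_dominant_colour dominant_colour dominant_colour_alt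
  cases hmax : PySem.List.max? values (fun y => y) with
  | none => rfl
  | some m =>
      have hm : m ∈ values := PySem.List.max?_mem hmax
      have hc : values.count m ≠ 0 := by
        rw [← List.count_pos_iff] at hm; omega
      simp only []
      rw [pvLoopA_none]
      by_cases h1 : values.count m = 1
      · simp [h1]
      · simp [h1, hc]
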